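-- pv_equiv track=rewrite | github.com/darcyjds-trip/wordwheel | scripts/generate_word_paths.py | build_green_edges
-- ===== SOURCE A (Python) =====
-- from collections import defaultdict
-- from typing import Callable, DefaultDict, Iterable
--
-- MIN_WORD_LENGTH = 4
--
-- def signature(word: str) -> str:
--     return "".join(sorted(word))
--
-- def deletion_signatures(word: str) -> set[str]:
--     sig = signature(word)
--     return {sig[:index] + sig[index + 1:] for index in range(len(sig))}
--
-- def build_green_edges(words: Iterable[str]) -> dict[str, list[str]]:
--     edges: DefaultDict[str, set[str]] = defaultdict(set)
--     longer_by_deleted_signature: DefaultDict[str, set[str]] = defaultdict(set)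
--
--     for word in words:
--         if len(word) == MIN_WORD_LENGTH:
--             continue
--         for deleted in deletion_signatures(word):
--             longer_by_deleted_signature[deleted].add(word)
--
--     for word in words:
--         edges[word].update(longer_by_deleted_signature.get(signature(word), set()))
--
--     return {word: sorted(neighbors) for word, neighbors in edges.items()}
-- ===== SOURCE B (Python) =====
-- MIN_WORD_LENGTH = 4
--
-- def signature(word: str) -> str:
--     return "".join(sorted(word))
--
-- def deletion_signatures(word: str) -> set[str]:
--     sig = signature(word)
--     return {sig[:index] + sig[index + 1:] for index in range(len(sig))}
--
-- def build_green_edges(words):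
--     distinct = list(dict.fromkeys(words))
--     candidates = [(x, deletion_signatures(x))
--                   for x in distinct if len(x) != MIN_WORD_LENGTH]
--     return {w: sorted(x for x, dels in candidates if signature(w) in dels)
--             for w in distinct}
-- ===== Notes on version B (the rewrite author's own statement) =====
-- stated objective: simpler
-- what changed: A builds a defaultdict index from every deleted signature to the longer words and then merges per-word lookups into edge sets; B uses no dicts or sets of edges at all: it dedupes the words once, precomputes each longer word's deletion-signature set, and builds every entry directly as a sorted filtered comprehension over those candidates.
import Mathlib
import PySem

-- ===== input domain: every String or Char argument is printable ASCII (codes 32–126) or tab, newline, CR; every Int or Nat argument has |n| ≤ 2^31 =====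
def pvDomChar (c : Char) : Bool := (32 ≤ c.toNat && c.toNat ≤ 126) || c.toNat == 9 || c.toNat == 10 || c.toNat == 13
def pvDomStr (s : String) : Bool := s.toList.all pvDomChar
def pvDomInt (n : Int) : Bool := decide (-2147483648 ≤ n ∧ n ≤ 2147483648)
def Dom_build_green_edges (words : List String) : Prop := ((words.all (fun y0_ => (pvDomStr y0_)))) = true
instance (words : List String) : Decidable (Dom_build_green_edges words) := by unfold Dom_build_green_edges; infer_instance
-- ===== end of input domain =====

-- A builds a deleted-signature → longer-words index with defaultdicts and merges per-word lookups
-- into edge sets; B uses no dicts: it dedupes the words, precomputes each longer word's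
-- deletion-signature set once, and emits every entry as a sorted filtered comprehension
-- over those candidates. Objective: simpler (no timing claim).

-- ===== PORT A =====
def MIN_WORD_LENGTH : Int := 4

def pySignature (word : String) : String :=
  String.ofList (PySem.List.sorted word.toList (fun c => c) false)

def pyDeletionSignatures (word : String) : PySem.Set String :=
  let sig := pySignature word
  PySem.Set.ofList ((PySem.List.pyRange 0 (PySem.Str.len sig) 1).map (fun index =>
    String.ofList (PySem.List.slice sig.toList none (some index) ++
               PySem.List.slice sig.toList (some (index + 1)) none)))

-- first loop of A: longer_by_deleted_signature
def pvLonger (words : List String) : PySem.Dict String (PySem.Set String) :=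
  words.foldl (fun d word =>
    if PySem.Str.len word == MIN_WORD_LENGTH then d
    else (pyDeletionSignatures word).foldl
      (fun d deleted => d.modify deleted PySem.Set.empty (fun s => PySem.Set.add s word)) d)
    PySem.Dict.empty

-- second loop of A: edges
def pvEdgesA (words : List String) : PySem.Dict String (PySem.Set String) :=
  words.foldl (fun e word =>
    e.modify word PySem.Set.empty
      (fun s => PySem.Set.update s ((pvLonger words).getD (pySignature word) PySem.Set.empty)))
    PySem.Dict.empty

def build_green_edges (words : List String) : List (String × List String) :=
  (pvEdgesA words).items.map (fun p => (p.1, PySem.List.sorted p.2 (fun x => x) false))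

-- ===== PORT B =====
def build_green_edges_alt (words : List String) : List (String × List String) :=
  let distinct := PySem.List.dedup words
  let candidates := (distinct.filter (fun x => !(PySem.Str.len x == MIN_WORD_LENGTH))).map
      (fun x => (x, pyDeletionSignatures x))
  distinct.map (fun w =>
    (w, PySem.List.sorted
          ((candidates.filter (fun p => PySem.Set.contains p.2 (pySignature w))).map Prod.fst)
          (fun s => s) false))

-- ===== PRECONDITION & SPEC =====
def Spec_build_green_edges (words : List String) (out : List (String × List String)) : Prop := out = build_green_edges_alt words
instance (words : List String) (out : List (String × List String)) : Decidable (Spec_build_green_edges words out) := by unfold Spec_build_green_edges; infer_instance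

-- ===== CLAIM (what is proved, stated in full; the proofs are below) =====
def Claim_equal_build_green_edges : Prop := ∀ (words : List String), Dom_build_green_edges words → Spec_build_green_edges words (build_green_edges words)

-- ===== LEMMAS AND PROOFS =====

-- x lands in slot k of a "for w in ws: d[w].add(v)" scatter loop iff it was there or x = v and k ∈ ws
theorem pv_mem_scatter (ws : List String) (v : String)
    (d : PySem.Dict String (PySem.Set String)) (k x : String) :
    x ∈ (ws.foldl (fun d w => d.modify w PySem.Set.empty (fun s => PySem.Set.add s v)) d).getD k PySem.Set.empty
      ↔ x ∈ d.getD k PySem.Set.empty ∨ (x = v ∧ k ∈ ws) := by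
  induction ws generalizing d with
  | nil => simp
  | cons w ws ih =>
    simp only [List.foldl_cons, ih, PySem.Dict.getD_modify, List.mem_cons]
    by_cases h : k = w
    · simp [h, PySem.Set.mem_add]; tauto
    · simp [h]

-- characterisation of A's first dict: x sits under deleted signature s iff x is a non-MIN word with s among its deletion signatures
theorem pv_mem_longer (words : List String) (s x : String) :
    x ∈ (pvLonger words).getD s PySem.Set.empty
      ↔ x ∈ words ∧ ¬ PySem.Str.len x = MIN_WORD_LENGTH ∧ s ∈ pyDeletionSignatures x := by
  suffices h : ∀ (l : List String) (d : PySem.Dict String (PySem.Set String)),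
      x ∈ (l.foldl (fun d word =>
        if PySem.Str.len word == MIN_WORD_LENGTH then d
        else (pyDeletionSignatures word).foldl
          (fun d deleted => d.modify deleted PySem.Set.empty (fun s => PySem.Set.add s word)) d) d).getD s PySem.Set.empty
        ↔ x ∈ d.getD s PySem.Set.empty ∨ (x ∈ l ∧ ¬ PySem.Str.len x = MIN_WORD_LENGTH ∧ s ∈ pyDeletionSignatures x) by
    rw [pvLonger, h]
    simp [PySem.Dict.getD_empty, PySem.Set.empty]
  intro l
  induction l with
  | nil => simp
  | cons w l ih =>
    intro d
    simp only [List.foldl_cons, ih, List.mem_cons]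
    by_cases hw : PySem.Str.len w = MIN_WORD_LENGTH
    · simp only [hw, beq_self_eq_true, if_true]
      constructor
      · rintro (h | h)
        · exact Or.inl h
        · exact Or.inr ⟨Or.inr h.1, h.2⟩
      · rintro (h | ⟨(rfl | hx), h2, h3⟩)
        · exact Or.inl h
        · exact absurd hw h2
        · exact Or.inr ⟨hx, h2, h3⟩
    · simp only [beq_iff_eq, hw, if_false, pv_mem_scatter]
      constructor
      · rintro ((h | ⟨rfl, hs⟩) | h)
        · exact Or.inl h
        · exact Or.inr ⟨Or.inl rfl, hw, hs⟩
        · exact Or.inr ⟨Or.inr h.1, h.2⟩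
      · rintro (h | ⟨(rfl | hx), h2, h3⟩)
        · exact Or.inl (Or.inl h)
        · exact Or.inl (Or.inr ⟨rfl, h3⟩)
        · exact Or.inr ⟨hx, h2, h3⟩

-- characterisation of A's edges slots
theorem pv_mem_edgesA (words : List String) (k x : String) :
    x ∈ (pvEdgesA words).getD k PySem.Set.empty
      ↔ k ∈ words ∧ x ∈ (pvLonger words).getD (pySignature k) PySem.Set.empty := by
  suffices h : ∀ (l : List String) (d : PySem.Dict String (PySem.Set String)),
      x ∈ (l.foldl (fun e word =>
        e.modify word PySem.Set.empty
          (fun s => PySem.Set.update s ((pvLonger words).getD (pySignature word) PySem.Set.empty))) d).getD k PySem.Set.empty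
        ↔ x ∈ d.getD k PySem.Set.empty ∨ (k ∈ l ∧ x ∈ (pvLonger words).getD (pySignature k) PySem.Set.empty) by
    rw [pvEdgesA, h]
    simp [PySem.Dict.getD_empty, PySem.Set.empty]
  intro l
  induction l with
  | nil => simp
  | cons w l ih =>
    intro d
    simp only [List.foldl_cons, ih, PySem.Dict.getD_modify, List.mem_cons]
    by_cases h : k = w
    · subst h; simp [PySem.Set.mem_update]; tauto
    · simp [h]

theorem pv_nodup_edgesA (words : List String) (k : String) :
    ((pvEdgesA words).getD k PySem.Set.empty).Nodup := by
  rw [pvEdgesA]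
  have h : ∀ (l : List String) (d : PySem.Dict String (PySem.Set String)),
      (∀ k', (d.getD k' PySem.Set.empty).Nodup) →
      ((l.foldl (fun e word =>
        e.modify word PySem.Set.empty
          (fun s => PySem.Set.update s ((pvLonger words).getD (pySignature word) PySem.Set.empty))) d).getD k PySem.Set.empty).Nodup := by
    intro l
    induction l with
    | nil => intro d hd; exact hd k
    | cons w l ih =>
      intro d hd
      refine ih _ (fun k' => ?_)
      rw [PySem.Dict.getD_modify]
      split
      · exact PySem.Set.nodup_update _ _ (hd w)
      · exact hd k'
  exact h words _ (fun k' => by simp [PySem.Dict.getD_empty, PySem.Set.empty])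

-- keys of A's edges dict: the distinct words in first-occurrence order
theorem pv_keys_edgesA (words : List String) :
    (pvEdgesA words).keys = PySem.Set.ofList words := by
  rw [pvEdgesA, PySem.Dict.keys_foldl_modify, PySem.Dict.keys_empty, PySem.Set.update_nil_left]

-- B's per-word candidate list, simplified: a filter of the distinct words
theorem pv_candidates_eq (words : List String) (w : String) :
    ((((PySem.Set.ofList words).filter (fun x => !(PySem.Str.len x == MIN_WORD_LENGTH))).map
        (fun x => (x, pyDeletionSignatures x))).filter
          (fun p => PySem.Set.contains p.2 (pySignature w))).map Prod.fst
      = (PySem.Set.ofList words).filter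
          (fun x => !(PySem.Str.len x == MIN_WORD_LENGTH)
            && PySem.Set.contains (pyDeletionSignatures x) (pySignature w)) := by
  rw [List.filter_map, List.map_map, List.filter_filter]
  simp [Function.comp_def, Bool.and_comm]

-- ===== VERDICT (by name: the statement is the Claim_ definition above) =====
set_option maxHeartbeats 1000000 in
theorem build_green_edges_spec : Claim_equal_build_green_edges := by
  intro words _
  unfold Spec_build_green_edges build_green_edges build_green_edges_alt
  rw [PySem.Dict.items_eq_map_keys (pvEdgesA words) (by rw [pv_keys_edgesA]; exact PySem.Set.nodup_ofList _) PySem.Set.empty,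
      pv_keys_edgesA, List.map_map]
  simp only [PySem.List.dedup_eq_ofList]
  refine List.map_congr_left (fun k hk => ?_)
  have hkw : k ∈ words := (PySem.Set.mem_ofList _ _).mp hk
  simp only [Function.comp]
  congr 1
  rw [pv_candidates_eq]
  rw [PySem.List.sorted_id_eq_sorted_id_iff_perm]
  rw [List.perm_ext_iff_of_nodup (pv_nodup_edgesA words k)
      ((PySem.Set.nodup_ofList words).filter _)]
  intro x
  rw [pv_mem_edgesA, pv_mem_longer, List.mem_filter]
  constructor
  · rintro ⟨-, hx, h4, hs⟩
    exact ⟨(PySem.Set.mem_ofList _ _).mpr hx,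
      by rw [Bool.and_eq_true, Bool.not_eq_true', beq_eq_false_iff_ne, PySem.Set.contains_iff]
         exact ⟨h4, hs⟩⟩
  · rintro ⟨hx, hb⟩
    rw [Bool.and_eq_true, Bool.not_eq_true', beq_eq_false_iff_ne, PySem.Set.contains_iff] at hb
    exact ⟨hkw, (PySem.Set.mem_ofList _ _).mp hx, hb.1, hb.2⟩
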